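-- pv_equiv track=rewrite | github.com/ramanathan831/Recommendation_PySpark | friend_recommendation.py | generate_pairs_for_each_person
-- ===== SOURCE A (Python) =====
-- def give_combinations(list_of_friends, num_elts_in_combination):
-- 	if(num_elts_in_combination == 0):
-- 		return [[]]
-- 	listvar = []
-- 	for index in range(0,len(list_of_friends)):
-- 		curr_friend_id = list_of_friends[index]
-- 		remaining_list = list_of_friends[index+1:]
-- 		for inner_index in give_combinations(remaining_list, num_elts_in_combination-1):
-- 			listvar.append([curr_friend_id] + inner_index)
-- 	return listvar
--
-- def generate_pairs_for_each_person(curr_line):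
-- 	if(curr_line is not None):
-- 		person_id = curr_line[0]
-- 		corresponding_friend_list = curr_line[1]
-- 		list_of_pairs = []
-- 		index = 0
-- 		while(index < len(corresponding_friend_list)):
-- 			individual_friend_id = corresponding_friend_list[index]
-- 			if(person_id < individual_friend_id):
-- 				key = (person_id, individual_friend_id)
-- 			else:
-- 				key = (individual_friend_id, person_id)
-- 			list_of_pairs.append((key, -1))
-- 			index += 1
-- 		index = 0
-- 		pair_combinations = give_combinations(corresponding_friend_list, 2)
-- 		while(index < len(pair_combinations)):
-- 			pair = pair_combinations[index]
-- 			combination_id_1 = pair[0]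
-- 			combination_id_2 = pair[1]
-- 			if(combination_id_1 < combination_id_2):
-- 				key = (combination_id_1, combination_id_2)
-- 			else:
-- 				key = (combination_id_2, combination_id_1)
-- 			list_of_pairs.append((key, 1))
-- 			index += 1
-- 		return list_of_pairs
-- ===== SOURCE B (Python) =====
-- def generate_pairs_for_each_person(curr_line):
-- 	if curr_line is None:
-- 		return None
-- 	person_id, friends = curr_line
-- 	out = [((min(person_id, f), max(person_id, f)), -1) for f in friends]
-- 	rest = friends
-- 	while rest:
-- 		x = rest[0]
-- 		rest = rest[1:]
-- 		for y in rest: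
-- 			out.append(((min(x, y), max(x, y)), 1))
-- 	return out
-- ===== Notes on version B (the rewrite author's own statement) =====
-- stated objective: simpler
-- what changed: Drops the recursive general-k give_combinations helper and the second index loop over its output: B emits (min,max)-normalized pair keys directly, the -1 markers via one comprehension over the friend list and the +1 pairs via a head/tail sweep over suffixes, with no intermediate list of 2-element combination lists.
import Mathlib
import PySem

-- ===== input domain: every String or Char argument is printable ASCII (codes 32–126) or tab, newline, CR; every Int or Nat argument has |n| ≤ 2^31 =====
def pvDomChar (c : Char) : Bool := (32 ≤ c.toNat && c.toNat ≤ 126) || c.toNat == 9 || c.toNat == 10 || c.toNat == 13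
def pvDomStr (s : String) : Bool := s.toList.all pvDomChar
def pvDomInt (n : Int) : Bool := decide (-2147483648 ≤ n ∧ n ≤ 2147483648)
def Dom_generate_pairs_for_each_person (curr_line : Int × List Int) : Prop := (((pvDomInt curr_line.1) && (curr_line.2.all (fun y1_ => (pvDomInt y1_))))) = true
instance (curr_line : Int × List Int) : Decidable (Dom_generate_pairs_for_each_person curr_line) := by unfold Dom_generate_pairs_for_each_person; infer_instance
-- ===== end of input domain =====

-- B replaces the recursive give_combinations helper and the second index loop with a direct
-- head/tail sweep emitting min/max-normalized keys; objective: simpler.  (In the typed Lean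
-- domain curr_line is never None, so A's None fall-through is unreachable.)

-- ===== PORT A =====
-- A's index loop with tail slice list[index+1:] ported as the equivalent structural recursion
-- on the list (index 0 = head, indices 1.. = the same loop on the tail slice).
def give_combinations (list_of_friends : List Int) (num_elts_in_combination : Int) : List (List Int) :=
  if num_elts_in_combination = 0 then [[]]
  else
    match list_of_friends with
    | [] => []
    | curr_friend_id :: remaining_list =>
        ((give_combinations remaining_list (num_elts_in_combination - 1)).map
          (fun inner => curr_friend_id :: inner)) ++
        give_combinations remaining_list num_elts_in_combination

def generate_pairs_for_each_person (curr_line : Int × List Int) : List ((Int × Int) × Int) :=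
  let person_id := curr_line.1
  let corresponding_friend_list := curr_line.2
  let list_of_pairs : List ((Int × Int) × Int) :=
    corresponding_friend_list.foldl (fun acc individual_friend_id =>
      acc ++ [((if person_id < individual_friend_id then (person_id, individual_friend_id)
                else (individual_friend_id, person_id)), -1)]) []
  let pair_combinations := give_combinations corresponding_friend_list 2
  pair_combinations.foldl (fun acc pair =>
    -- pair[0], pair[1]; every element of give_combinations _ 2 has length 2, so the
    -- catch-all branch is unreachable (Python would raise IndexError there)
    match pair with
    | combination_id_1 :: combination_id_2 :: _ =>
        acc ++ [((if combination_id_1 < combination_id_2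
                  then (combination_id_1, combination_id_2)
                  else (combination_id_2, combination_id_1)), (1:Int))]
    | _ => acc ++ [((0, 0), (1:Int))]) list_of_pairs

-- ===== PORT B =====
def pvPosPairs : List Int → List ((Int × Int) × Int)
  | [] => []
  | x :: rest => (rest.map (fun y => ((min x y, max x y), 1))) ++ pvPosPairs rest

def generate_pairs_for_each_person_alt (curr_line : Int × List Int) : List ((Int × Int) × Int) :=
  let person_id := curr_line.1
  let friends := curr_line.2
  (friends.map (fun f => ((min person_id f, max person_id f), -1))) ++ pvPosPairs friends

-- ===== PRECONDITION & SPEC =====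
def Spec_generate_pairs_for_each_person (curr_line : Int × List Int) (out : List ((Int × Int) × Int)) : Prop := out = generate_pairs_for_each_person_alt curr_line
instance (curr_line : Int × List Int) (out : List ((Int × Int) × Int)) : Decidable (Spec_generate_pairs_for_each_person curr_line out) := by unfold Spec_generate_pairs_for_each_person; infer_instance

-- ===== CLAIM (what is proved, stated in full; the proofs are below) =====
def Claim_equal_generate_pairs_for_each_person : Prop := ∀ (curr_line : Int × List Int), Dom_generate_pairs_for_each_person curr_line → Spec_generate_pairs_for_each_person curr_line (generate_pairs_for_each_person curr_line)

-- ===== LEMMAS AND PROOFS =====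

lemma give_combinations_zero (l : List Int) : give_combinations l 0 = [[]] := by
  cases l <;> simp [give_combinations]

lemma give_combinations_one (l : List Int) :
    give_combinations l 1 = l.map (fun x => [x]) := by
  induction l with
  | nil => simp [give_combinations]
  | cons x rest ih => simp [give_combinations, give_combinations_zero, ih]

lemma key_eq (a b : Int) :
    (if a < b then (a, b) else (b, a)) = (min a b, max a b) := by
  rcases lt_or_ge a b with h | h
  · simp [h, min_eq_left h.le, max_eq_right h.le]
  · simp [not_lt.mpr h, min_eq_right h, max_eq_left h]

lemma pair_fold_map (x : Int) (rest : List Int) (init : List ((Int × Int) × Int)) :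
    (rest.map (fun y => [x, y])).foldl (fun acc pair =>
      match pair with
      | c1 :: c2 :: _ =>
          acc ++ [((if c1 < c2 then (c1, c2) else (c2, c1)), (1:Int))]
      | _ => acc ++ [((0, 0), (1:Int))]) init
    = init ++ rest.map (fun y => ((min x y, max x y), 1)) := by
  induction rest generalizing init with
  | nil => simp
  | cons y ys ihy =>
      simp only [List.map_cons, List.foldl_cons]
      rw [ihy]
      simp [key_eq]

lemma pair_fold_shift (L : List (List Int)) (init : List ((Int × Int) × Int)) :
    L.foldl (fun acc pair =>
      match pair with
      | c1 :: c2 :: _ =>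
          acc ++ [((if c1 < c2 then (c1, c2) else (c2, c1)), (1:Int))]
      | _ => acc ++ [((0, 0), (1:Int))]) init
    = init ++ L.foldl (fun acc pair =>
      match pair with
      | c1 :: c2 :: _ =>
          acc ++ [((if c1 < c2 then (c1, c2) else (c2, c1)), (1:Int))]
      | _ => acc ++ [((0, 0), (1:Int))]) [] := by
  induction L generalizing init with
  | nil => simp
  | cons p ps ihp =>
      simp only [List.foldl_cons]
      rw [ihp, ihp (match p with
        | c1 :: c2 :: _ => [] ++ [((if c1 < c2 then (c1, c2) else (c2, c1)), (1:Int))]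
        | _ => [] ++ [((0, 0), (1:Int))])]
      cases p with
      | nil => simp
      | cons c1 t =>
          cases t with
          | nil => simp
          | cons c2 t2 => simp

lemma pos_part (l : List Int) :
    (give_combinations l 2).foldl (fun acc pair =>
      match pair with
      | c1 :: c2 :: _ =>
          acc ++ [((if c1 < c2 then (c1, c2) else (c2, c1)), (1:Int))]
      | _ => acc ++ [((0, 0), (1:Int))]) [] = pvPosPairs l := by
  induction l with
  | nil => simp [give_combinations, pvPosPairs]
  | cons x rest ih =>
      rw [show give_combinations (x :: rest) 2
            = (rest.map (fun y => [x, y])) ++ give_combinations rest 2 by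
        simp [give_combinations, give_combinations_one, Function.comp]]
      rw [List.foldl_append, pair_fold_map, pair_fold_shift, ih, pvPosPairs]
      simp

lemma neg_part (p : Int) (l : List Int) :
    l.foldl (fun acc f =>
      acc ++ [((if p < f then (p, f) else (f, p)), -1)]) []
    = l.map (fun f => ((min p f, max p f), -1)) := by
  have := PySem.List.foldl_append_singleton_eq_map
    (f := fun f : Int => ((if p < f then (p, f) else (f, p)), (-1 : Int))) (l := l)
  simp only [key_eq] at *
  simpa using this

-- ===== VERDICT (by name: the statement is the Claim_ definition above) =====
theorem generate_pairs_for_each_person_spec : Claim_equal_generate_pairs_for_each_person := by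
  intro curr_line _
  obtain ⟨p, fl⟩ := curr_line
  unfold Spec_generate_pairs_for_each_person generate_pairs_for_each_person
    generate_pairs_for_each_person_alt
  simp only [neg_part]
  rw [pair_fold_shift, pos_part]
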